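-- pv_equiv track=rewrite | github.com/yangt8/31 | lab6/lab6.py | rotate_alphabet
-- ===== SOURCE A (Python) =====
-- def rotate_alphabet(key:int) -> str:
--     alphabet = list('abcdefghijklmnopqrstuvwxyz')
--     new_alphabet = []
--     for x, letter in enumerate(alphabet):
--         try:
--             new_alphabet.append(alphabet[x+key])
--         except IndexError:
--             y = len(alphabet) - x
--             key = key % 26
--             new_alphabet.append(alphabet[0+key-y])
--     return ''.join(new_alphabet)
-- ===== SOURCE B (Python) =====
-- def rotate_alphabet(key: int) -> str:
--     a = 'abcdefghijklmnopqrstuvwxyz'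
--     k = key % 26
--     return a[k:] + a[:k]
-- ===== Notes on version B (the rewrite author's own statement) =====
-- stated objective: idiomatic
-- what changed: Replaces the per-letter loop with its try/except IndexError wraparound and list accumulation by a single closed-form rotation: normalize the key with one modulo and concatenate the two string slices a[k:] + a[:k].
import Mathlib
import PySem

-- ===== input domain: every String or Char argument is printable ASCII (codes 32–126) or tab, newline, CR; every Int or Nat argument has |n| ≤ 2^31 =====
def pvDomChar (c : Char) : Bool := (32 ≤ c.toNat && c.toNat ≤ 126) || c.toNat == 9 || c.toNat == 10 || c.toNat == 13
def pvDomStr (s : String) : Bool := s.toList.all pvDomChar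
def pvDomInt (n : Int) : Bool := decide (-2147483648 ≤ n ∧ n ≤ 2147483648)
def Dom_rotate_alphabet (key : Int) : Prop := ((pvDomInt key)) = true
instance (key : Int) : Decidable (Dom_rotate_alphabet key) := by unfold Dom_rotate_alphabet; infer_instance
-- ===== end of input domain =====

-- B replaces A's per-letter loop with try/except wraparound by one modulo and two slices (idiomatic closed form); same return value for every int key.

-- ===== PORT A =====
def pvAlpha : List Char := "abcdefghijklmnopqrstuvwxyz".toList

-- loop body of A; state = (current value of `key` (mutated in the except branch), new_alphabet)
def pvStepA (st : Int × List Char) (p : Int × Char) : Int × List Char :=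
  match PySem.List.pyGet? pvAlpha (p.1 + st.1) with
  | some c => (st.1, st.2 ++ [c])
  | none =>
    let k := PySem.Int.mod st.1 26
    -- alphabet[0+key-y]: this second access never raises on any reachable state, so .getD is exact
    (k, st.2 ++ [(PySem.List.pyGet? pvAlpha (0 + k - ((pvAlpha.length : Int) - p.1))).getD 'a'])

def rotate_alphabet (key : Int) : String :=
  String.ofList ((PySem.List.enumerate pvAlpha).foldl pvStepA (key, [])).2

-- ===== PORT B =====
def rotate_alphabet_alt (key : Int) : String :=
  let a := "abcdefghijklmnopqrstuvwxyz".toList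
  let k := PySem.Int.mod key 26
  String.ofList (PySem.List.slice a (some k) none ++ PySem.List.slice a none (some k))

-- ===== PRECONDITION & SPEC =====
def Spec_rotate_alphabet (key : Int) (out : String) : Prop := out = rotate_alphabet_alt key
instance (key : Int) (out : String) : Decidable (Spec_rotate_alphabet key out) := by unfold Spec_rotate_alphabet; infer_instance

-- ===== CLAIM (what is proved, stated in full; the proofs are below) =====
def Claim_equal_rotate_alphabet : Prop := ∀ (key : Int), Dom_rotate_alphabet key → Spec_rotate_alphabet key (rotate_alphabet key)

-- ===== LEMMAS AND PROOFS =====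

-- on keys the first index already over/underflows, A's first iteration normalizes the key to key % 26
lemma pvStep_norm (key m : Int) (hout : key < -26 ∨ 25 < key) (hm : PySem.Int.mod key 26 = m) :
    pvStepA (key, []) (0, 'a') = pvStepA (m, []) (0, 'a') := by
  have h0 : 0 ≤ m := hm ▸ PySem.Int.mod_nonneg key (by norm_num)
  have h1 : m < 26 := hm ▸ PySem.Int.mod_lt key (by norm_num)
  have hnone : PySem.List.pyGet? pvAlpha (0 + key) = none := by
    rw [PySem.List.pyGet?_eq_none_iff]
    simp [PySem.Raise.InRange, pvAlpha]
    omega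
  simp only [pvStepA, hnone, hm]
  interval_cases m <;> decide

lemma pvRotate_norm (key : Int) (hout : key < -26 ∨ 25 < key) :
    rotate_alphabet key = rotate_alphabet (PySem.Int.mod key 26) := by
  have henum : PySem.List.enumerate pvAlpha
      = (0, 'a') :: PySem.List.enumerate pvAlpha.tail 1 := by decide
  simp only [rotate_alphabet, henum, List.foldl_cons]
  rw [pvStep_norm key _ hout rfl]

lemma pvAlt_norm (key : Int) :
    rotate_alphabet_alt (PySem.Int.mod key 26) = rotate_alphabet_alt key := by
  have h26 : (0:Int) < 26 := by norm_num
  simp only [rotate_alphabet_alt]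
  simp only [PySem.Int.mod_eq_emod_of_pos h26, Int.emod_emod_of_dvd key (dvd_refl 26)]

set_option maxRecDepth 4096 in
lemma pvFin (k : Int) (h1 : -26 ≤ k) (h2 : k ≤ 25) :
    rotate_alphabet k = rotate_alphabet_alt k := by
  interval_cases k <;> decide

-- ===== VERDICT (by name: the statement is the Claim_ definition above) =====
theorem rotate_alphabet_spec : Claim_equal_rotate_alphabet := by
  intro key _
  unfold Spec_rotate_alphabet
  by_cases h : -26 ≤ key ∧ key ≤ 25
  · exact pvFin key h.1 h.2
  · have hout : key < -26 ∨ 25 < key := by omega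
    have h0 : 0 ≤ PySem.Int.mod key 26 := PySem.Int.mod_nonneg key (by norm_num)
    have h1 : PySem.Int.mod key 26 < 26 := PySem.Int.mod_lt key (by norm_num)
    rw [pvRotate_norm key hout, pvFin _ (by omega) (by omega), pvAlt_norm]
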